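-- pv_equiv track=rewrite | github.com/zxl18688925980/CrewHiveClaw | HomeAILocal/Scripts/distill-knowledge-discussions.py | group_by_user_day
-- ===== SOURCE A (Python) =====
-- def group_by_user_day(records):
--     groups = {}
--     for rec in records:
--         m   = rec["metadata"]
--         uid = str(m.get("userId", "")).lower()
--         day = str(m.get("timestamp", ""))[:10]
--         key = (uid, day)
--         groups.setdefault(key, []).append(rec)
--     return groups
-- ===== SOURCE B (Python) =====
-- def group_by_user_day(records):
--     def keyfn(rec):
--         m = rec["metadata"]
--         return (str(m.get("userId", "")).lower(), str(m.get("timestamp", ""))[:10])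
--     return {k: [r for r in records if keyfn(r) == k]
--             for k in dict.fromkeys(map(keyfn, records))}
-- ===== Notes on version B (the rewrite author's own statement) =====
-- stated objective: alternative
-- what changed: Instead of accumulating a dict of growing lists via setdefault/append, B computes the distinct (userId, day) keys once with dict.fromkeys and builds each group by a per-key filter pass over the records.
import Mathlib
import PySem

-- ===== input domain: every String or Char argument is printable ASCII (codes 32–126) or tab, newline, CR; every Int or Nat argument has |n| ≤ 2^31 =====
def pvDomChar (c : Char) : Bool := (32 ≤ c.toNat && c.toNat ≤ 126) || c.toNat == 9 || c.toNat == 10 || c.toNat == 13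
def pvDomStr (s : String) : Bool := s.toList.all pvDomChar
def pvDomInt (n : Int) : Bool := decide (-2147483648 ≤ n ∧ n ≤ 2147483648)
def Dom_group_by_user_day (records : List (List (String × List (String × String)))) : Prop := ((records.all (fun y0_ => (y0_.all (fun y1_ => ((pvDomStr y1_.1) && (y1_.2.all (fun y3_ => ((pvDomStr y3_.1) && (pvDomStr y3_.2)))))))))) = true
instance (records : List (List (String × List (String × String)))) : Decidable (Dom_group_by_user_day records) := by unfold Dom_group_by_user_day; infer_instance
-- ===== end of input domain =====

-- B replaces A's incremental dict-of-lists accumulation by deduplicating the key list once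
-- and building each group with a per-key filter pass (alternative decomposition, same results).


-- ===== PORT A =====
-- literal transliteration: groups = {}; for rec: m = rec["metadata"]; uid; day; key;
-- groups.setdefault(key, []).append(rec)  =  groups.modify key [] (· ++ [rec]); return groups
-- (rec["metadata"] raises KeyError when the key is absent — excluded by Pre_; .getD [] is the total form;
--  the trailing .items.map flattens the dict's ((uid, day), recs) pairs into the declared return type)
def group_by_user_day (records : List (List (String × List (String × String)))) : List (String × String × List (List (String × List (String × String)))) :=
  (records.foldl (fun groups rec =>
      let m := (rec.lookup "metadata").getD []
      let uid := PySem.Str.lower ((m.lookup "userId").getD "")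
      let day := PySem.Str.slice ((m.lookup "timestamp").getD "") none (some 10)
      let key := (uid, day)
      groups.modify key [] (fun v => v ++ [rec])) PySem.Dict.empty).items.map
    (fun kv => (kv.1.1, kv.1.2, kv.2))

-- ===== PORT B =====
-- keyfn(rec) = (str(m.get('userId','')).lower(), str(m.get('timestamp',''))[:10])
def pvKeyB (rec : List (String × List (String × String))) : String × String :=
  let m := (rec.lookup "metadata").getD []
  (PySem.Str.lower ((m.lookup "userId").getD ""), PySem.Str.slice ((m.lookup "timestamp").getD "") none (some 10))

-- {k: [r for r in records if keyfn(r) == k] for k in dict.fromkeys(map(keyfn, records))}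
def group_by_user_day_alt (records : List (List (String × List (String × String)))) : List (String × String × List (List (String × List (String × String)))) :=
  (PySem.List.dedup (records.map pvKeyB)).map
    (fun k => (k.1, k.2, records.filter (fun r => pvKeyB r == k)))

-- ===== PRECONDITION & SPEC =====
-- Pre_ excludes exactly the records without a "metadata" key, on which A (and B) raise KeyError.
def Pre_group_by_user_day (records : List (List (String × List (String × String)))) : Prop :=
  ∀ rec ∈ records, (rec.lookup "metadata").isSome = true
instance (records : List (List (String × List (String × String)))) : Decidable (Pre_group_by_user_day records) := by unfold Pre_group_by_user_day; infer_instance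

def pvWitness_group_by_user_day : (List (List (String × List (String × String)))) :=
  [[("metadata", [("userId", "Ann"), ("timestamp", "2024-01-02T03:04:05")])],
   [("metadata", [("userId", "ann")])]]

def Spec_group_by_user_day (records : List (List (String × List (String × String)))) (out : List (String × String × List (List (String × List (String × String))))) : Prop := out = group_by_user_day_alt records
instance (records : List (List (String × List (String × String)))) (out : List (String × String × List (List (String × List (String × String))))) : Decidable (Spec_group_by_user_day records out) := by
  unfold Spec_group_by_user_day
  letI d1 : DecidableEq (List (List (String × List (String × String)))) := instDecidableEqList
  letI d2 : DecidableEq (String × String × List (List (String × List (String × String)))) := instDecidableEqProd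
  exact instDecidableEqList out (group_by_user_day_alt records)

-- ===== CLAIM (what is proved, stated in full; the proofs are below) =====
def Claim_equal_group_by_user_day : Prop := ∀ (records : List (List (String × List (String × String)))), Dom_group_by_user_day records → Pre_group_by_user_day records → Spec_group_by_user_day records (group_by_user_day records)

-- ===== LEMMAS AND PROOFS =====

-- first match in a list of (key, g key) pairs
theorem find_map_pair {κ ν : Type} [BEq κ] [LawfulBEq κ] (l : List κ) (g : κ → ν) (c : κ)
    (h : c ∈ l) :
    List.find? (fun p => p.1 == c) (l.map (fun k => (k, g k))) = some (c, g c) := by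
  induction l with
  | nil => cases h
  | cons a l ih =>
    by_cases hac : a = c
    · subst hac; simp
    · rcases List.mem_cons.mp h with h | h
      · exact absurd h.symm hac
      · simpa [List.find?, hac] using ih h

-- A's dict accumulation, characterised as dedup-of-keys + per-key filter (the shape of B)
theorem foldl_modify_grouped {α κ : Type} [BEq κ] [LawfulBEq κ] (key : α → κ) (rs : List α) :
    (rs.foldl (fun g r => g.modify (key r) [] (fun v => v ++ [r])) PySem.Dict.empty).items
      = (PySem.List.dedup (rs.map key)).map (fun k => (k, rs.filter (fun r => key r == k))) := by
  induction rs using List.reverseRecOn with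
  | nil => rfl
  | append_singleton rs r ih =>
    rw [List.foldl_append, List.map_append]
    simp only [List.foldl_cons, List.foldl_nil, List.map_cons, List.map_nil]
    set G := List.foldl (fun g r => g.modify (key r) [] (fun v => v ++ [r])) PySem.Dict.empty rs
      with hGdef
    have hded : PySem.List.dedup (rs.map key ++ [key r])
        = if key r ∈ PySem.List.dedup (rs.map key)
          then PySem.List.dedup (rs.map key) else PySem.List.dedup (rs.map key) ++ [key r] := by
      simp [PySem.List.dedup, PySem.Set.ofList, List.foldl_append, PySem.Set.add,
        List.contains_eq_mem]
    have hfilt : ∀ k, (rs ++ [r]).filter (fun r' => key r' == k)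
        = rs.filter (fun r' => key r' == k) ++ (if (key r == k) = true then [r] else []) := by
      intro k
      rw [List.filter_append]
      simp [List.filter_cons]
    have hmod : (G.modify (key r) [] (fun v => v ++ [r]))
        = if G.contains (key r) = true
          then PySem.Dict.mk (G.items.map
            (fun p => if (p.1 == key r) = true then (key r, G.getD (key r) [] ++ [r]) else p))
          else PySem.Dict.mk (G.items ++ [(key r, G.getD (key r) [] ++ [r])]) := rfl
    rw [hmod, hded]
    by_cases hmem : key r ∈ PySem.List.dedup (rs.map key)
    · -- key already present: the dict updates that entry in place, dedup is unchanged
      have hcont : G.contains (key r) = true := by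
        rw [PySem.Dict.contains, ih, List.any_eq_true]
        exact ⟨(key r, rs.filter (fun r' => key r' == key r)),
          List.mem_map.mpr ⟨key r, hmem, rfl⟩, by simp⟩
      have hget : G.getD (key r) [] = rs.filter (fun r' => key r' == key r) := by
        rw [PySem.Dict.getD, PySem.Dict.get?, ih, find_map_pair _ _ _ hmem]
        rfl
      rw [if_pos hcont, if_pos hmem]
      show G.items.map _ = _
      rw [ih, hget, List.map_map]
      refine List.map_congr_left ?_
      intro k hk
      rw [Function.comp_apply, hfilt k]
      by_cases hkr : k = key r
      · subst hkr; simp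
      · simp [beq_iff_eq, hkr, Ne.symm hkr]
    · -- new key: the dict appends the entry, dedup appends the key
      have hrnotin : key r ∉ rs.map key := fun h => hmem ((PySem.List.mem_dedup _ _).mpr h)
      have hcont : G.contains (key r) = false := by
        rw [PySem.Dict.contains, ih, List.any_eq_false]
        intro p hp
        obtain ⟨k, hk, rfl⟩ := List.mem_map.mp hp
        simp only [beq_iff_eq]
        exact fun h => hmem (h ▸ hk)
      have hget : G.getD (key r) [] = [] := by
        rw [PySem.Dict.getD, PySem.Dict.get?, ih, List.find?_eq_none.mpr ?_]
        · rfl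
        · intro p hp
          obtain ⟨k, hk, rfl⟩ := List.mem_map.mp hp
          simp only [beq_iff_eq]
          exact fun h => hmem (h ▸ hk)
      rw [if_neg (by simp [hcont]), if_neg hmem]
      show G.items ++ _ = _
      rw [ih, hget, List.map_append, List.map_cons, List.map_nil]
      congr 1
      · refine List.map_congr_left ?_
        intro k hk
        rw [hfilt k]
        have hne : (key r == k) = false := by
          simp only [beq_eq_false_iff_ne, ne_eq]
          intro h; subst h; exact hmem hk
        simp [hne]
      · rw [hfilt (key r)]
        have hnil : rs.filter (fun r' => key r' == key r) = [] := by
          rw [List.filter_eq_nil_iff]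
          intro a ha h
          exact hrnotin (List.mem_map.mpr ⟨a, ha, by simpa using h⟩)
        simp [hnil]

-- ===== VERDICT (by name: the statement is the Claim_ definition above) =====
theorem group_by_user_day_spec : Claim_equal_group_by_user_day := by
  intro records _ _
  show group_by_user_day records = group_by_user_day_alt records
  have h : group_by_user_day records
      = ((records.foldl (fun g r => g.modify (pvKeyB r) [] (fun v => v ++ [r]))
          PySem.Dict.empty).items).map (fun kv => (kv.1.1, kv.1.2, kv.2)) := rfl
  rw [h, foldl_modify_grouped pvKeyB records, List.map_map]
  rfl
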